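-- pv_equiv track=rewrite | github.com/The-devop/Cipher-Labs | crypto_core.py | keyboard_shift
-- ===== SOURCE A (Python) =====
-- def keyboard_shift(text: str, shift: int = 1) -> str:
--     """Shift each character by position on keyboard"""
--     keyboard = "qwertyuiopasdfghjklzxcvbnm"
--     result = []
--     for ch in text.lower():
--         if ch in keyboard:
--             idx = keyboard.index(ch)
--             result.append(keyboard[(idx + shift) % len(keyboard)])
--         else:
--             result.append(ch)
--     return "".join(result).upper()
-- ===== SOURCE B (Python) =====
-- def keyboard_shift(text: str, shift: int = 1) -> str:
--     """Shift each character by position on keyboard"""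
--     keyboard = "qwertyuiopasdfghjklzxcvbnm"
--     step = dict(zip(keyboard, keyboard[1:] + keyboard[0]))
--     chars = list(text.lower())
--     for _ in range(shift % 26):
--         chars = [step.get(c, c) for c in chars]
--     return "".join(chars).upper()
-- ===== Notes on version B (the rewrite author's own statement) =====
-- stated objective: alternative
-- what changed: Instead of A's per-character membership test plus linear keyboard.index scan, B builds only the single-step successor permutation of the keyboard (each letter maps to the next one) and applies that whole-string pass shift%26 times (iterated permutation), leaving non-letters fixed because they are absent from the step dict.
import Mathlib
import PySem

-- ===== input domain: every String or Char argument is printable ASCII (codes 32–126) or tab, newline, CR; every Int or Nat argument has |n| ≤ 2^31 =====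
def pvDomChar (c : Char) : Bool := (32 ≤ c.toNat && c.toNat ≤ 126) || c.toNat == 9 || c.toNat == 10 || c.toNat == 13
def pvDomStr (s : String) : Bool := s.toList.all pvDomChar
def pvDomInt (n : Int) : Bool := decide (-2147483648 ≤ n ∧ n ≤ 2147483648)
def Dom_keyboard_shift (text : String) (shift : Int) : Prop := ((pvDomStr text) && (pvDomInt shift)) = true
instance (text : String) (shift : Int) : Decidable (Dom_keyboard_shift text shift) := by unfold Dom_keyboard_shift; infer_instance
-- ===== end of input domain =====

-- B replaces A's per-character index lookup into the keyboard by the iterated single-step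
-- successor permutation: one small next-key dict, applied to the whole string shift % 26 times.

-- ===== PORT A =====
def keyboard_shift (text : String) (shift : Int) : String :=
  let keyboard : List Char := "qwertyuiopasdfghjklzxcvbnm".toList
  let result : List Char :=
    (PySem.Chars.lower text.toList).foldl
      (fun acc ch =>
        if ch ∈ keyboard then
          -- keyboard.index(ch): ch ∈ keyboard, so index? is some; the default is never used.
          -- keyboard[(idx+shift) % len]: the mod of the positive length is always in range,
          -- so pyGetD is exact (the default is never used).
          let idx : Int := ((PySem.List.index? keyboard ch).getD 0 : Nat)
          acc ++ [PySem.List.pyGetD keyboard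
                    (PySem.Int.mod (idx + shift) (keyboard.length : Int)) ch]
        else
          acc ++ [ch]) []
  String.ofList (PySem.Chars.upper (PySem.Chars.join [] (result.map (fun c => [c]))))

-- ===== PORT B =====
def keyboard_shift_alt (text : String) (shift : Int) : String :=
  let keyboard : List Char := "qwertyuiopasdfghjklzxcvbnm".toList
  -- keyboard[1:] + keyboard[0] (index 0 is in range; the default is never used)
  let rotated : List Char :=
    PySem.List.slice keyboard (some 1) none ++ [PySem.List.pyGetD keyboard 0 'q']
  -- step = dict(zip(keyboard, rotated))
  let step : PySem.Dict Char Char :=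
    (keyboard.zip rotated).foldl (fun d p => PySem.Dict.insert d p.1 p.2) PySem.Dict.empty
  let chars0 : List Char := PySem.Chars.lower text.toList
  -- for _ in range(shift % 26): chars = [step.get(c, c) for c in chars]
  let chars : List Char :=
    (PySem.List.pyRange 0 (PySem.Int.mod shift 26) 1).foldl
      (fun cs _ => cs.map (fun c => PySem.Dict.getD step c c)) chars0
  String.ofList (PySem.Chars.upper (PySem.Chars.join [] (chars.map (fun c => [c]))))

-- ===== PRECONDITION & SPEC =====
def Spec_keyboard_shift (text : String) (shift : Int) (out : String) : Prop := out = keyboard_shift_alt text shift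
instance (text : String) (shift : Int) (out : String) : Decidable (Spec_keyboard_shift text shift out) := by unfold Spec_keyboard_shift; infer_instance

-- ===== CLAIM =====
def Claim_equal_keyboard_shift : Prop := ∀ (text : String) (shift : Int), Dom_keyboard_shift text shift → Spec_keyboard_shift text shift (keyboard_shift text shift)

-- ===== LEMMAS AND PROOFS =====

def pvKb : List Char := "qwertyuiopasdfghjklzxcvbnm".toList

-- B's one-step successor dict (a closed literal)
def pvNext : PySem.Dict Char Char :=
  (pvKb.zip (PySem.List.slice pvKb (some 1) none ++ [PySem.List.pyGetD pvKb 0 'q'])).foldl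
    (fun d p => PySem.Dict.insert d p.1 p.2) PySem.Dict.empty

def pvF (c : Char) : Char := PySem.Dict.getD pvNext c c

-- A's per-character step, extracted
def pvStepA (shift : Int) (ch : Char) : Char :=
  if ch ∈ pvKb then
    PySem.List.pyGetD pvKb
      (PySem.Int.mod (((PySem.List.index? pvKb ch).getD 0 : Nat) + shift) (pvKb.length : Int)) ch
  else ch

-- A's append-or-append loop is a map
theorem pv_foldl_ite_append {α β : Type} (p : α → Prop) [DecidablePred p] (f g : α → β)
    (l : List α) (acc : List β) :
    l.foldl (fun acc ch => if p ch then acc ++ [f ch] else acc ++ [g ch]) acc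
      = acc ++ l.map (fun ch => if p ch then f ch else g ch) := by
  induction l generalizing acc with
  | nil => simp
  | cons x xs ih =>
      by_cases hx : p x <;> simp [hx, ih, List.append_assoc]

-- B's loop over range is function iteration
theorem pv_foldl_const {α : Type} (g : α → α) (l : List Int) (s : α) :
    l.foldl (fun s _ => g s) s = g^[l.length] s := by
  induction l generalizing s with
  | nil => simp
  | cons x xs ih => simp [ih, Function.iterate_succ_apply]

-- iterating a whole-list map is mapping the iterate
theorem pv_iterate_map {α : Type} (f : α → α) (n : Nat) (s : List α) :
    (fun cs : List α => cs.map f)^[n] s = s.map f^[n] := by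
  induction n generalizing s with
  | zero => simp
  | succ m ih =>
      rw [Function.iterate_succ_apply, ih, List.map_map]
      apply List.map_congr_left
      intro c _
      exact (Function.iterate_succ_apply f m c).symm

theorem pv_next_keys (c : Char) (hc : c ∉ pvKb) : pvNext.contains c = false := by
  by_contra h
  simp only [Bool.not_eq_false] at h
  have hmem := (PySem.Dict.contains_iff_mem_keys _ _).mp h
  unfold pvNext at hmem
  rw [PySem.Dict.keys_foldl_insert_key] at hmem
  rw [PySem.Dict.keys_empty] at hmem
  rw [List.map_fst_zip (by decide)] at hmem
  rcases (PySem.Set.mem_update _ _ _).mp hmem with h' | h'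
  · simp at h'
  · exact hc h'

def pvIdx (c : Char) : Nat := (PySem.List.index? pvKb c).getD 0

theorem pv_len : pvKb.length = 26 := by decide

theorem pv_getD_default (j : Nat) (hj : j < 26) (x y : Char) :
    pvKb.getD j x = pvKb.getD j y := by
  rw [List.getD_eq_getElem pvKb x (by rw [pv_len]; omega),
      List.getD_eq_getElem pvKb y (by rw [pv_len]; omega)]

theorem pv_mem_getD (j : Nat) (hj : j < 26) : pvKb.getD j 'q' ∈ pvKb := by
  rw [List.getD_eq_getElem pvKb 'q' (by rw [pv_len]; omega)]
  exact List.getElem_mem _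

-- the decidable cores: index correctness and ONE step of pvF, per keyboard letter
theorem pv_c0 : (pvKb.all fun c =>
    (pvKb.getD (pvIdx c) c == c) && decide (pvIdx c < 26)) = true := by decide

theorem pv_c1 : (pvKb.all fun c =>
    pvF c == pvKb.getD ((pvIdx c + 1) % 26) c) = true := by decide

theorem pv_c2 : ((List.range 26).all fun j =>
    PySem.List.index? pvKb (pvKb.getD j 'q') == some j) = true := by decide

-- iterating pvF n times from a keyboard letter lands n places further along the keyboard
theorem pv_iter (n : Nat) (c : Char) (hc : c ∈ pvKb) :
    pvF^[n] c = pvKb.getD ((pvIdx c + n) % 26) c := by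
  have h0 := pv_c0
  rw [List.all_eq_true] at h0
  obtain ⟨hfix, hlt⟩ : pvKb.getD (pvIdx c) c = c ∧ pvIdx c < 26 := by
    simpa using h0 c hc
  induction n with
  | zero =>
      rw [Function.iterate_zero_apply, Nat.add_zero, Nat.mod_eq_of_lt hlt]
      exact hfix.symm
  | succ m ih =>
      rw [Function.iterate_succ_apply', ih]
      set j : Nat := (pvIdx c + m) % 26 with hj
      have hj26 : j < 26 := Nat.mod_lt _ (by norm_num)
      have hdq : pvKb.getD j c = pvKb.getD j 'q' := pv_getD_default j hj26 c 'q'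
      set d : Char := pvKb.getD j 'q' with hd
      have hdmem : d ∈ pvKb := pv_mem_getD j hj26
      have h1 := pv_c1
      rw [List.all_eq_true] at h1
      have hstep : pvF d = pvKb.getD ((pvIdx d + 1) % 26) d := beq_iff_eq.mp (h1 d hdmem)
      have h2 := pv_c2
      rw [List.all_eq_true] at h2
      have hidx : pvIdx d = j := by
        have h2j := beq_iff_eq.mp (h2 j (List.mem_range.mpr hj26))
        unfold pvIdx
        rw [hd, h2j]
        rfl
      rw [hdq, hstep, hidx]
      have harith : (j + 1) % 26 = (pvIdx c + (m + 1)) % 26 := by omega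
      rw [harith]
      exact pv_getD_default _ (Nat.mod_lt _ (by norm_num)) d c

theorem pv_core (n : Nat) (c : Char) (hc : c ∈ pvKb) :
    pvKb.getD (((PySem.List.index? pvKb c).getD 0 + n) % 26) c = pvF^[n] c :=
  (pv_iter n c hc).symm

theorem pv_step (shift : Int) (ch : Char) :
    pvStepA shift ch = pvF^[(PySem.Int.mod shift 26).toNat] ch := by
  by_cases hc : ch ∈ pvKb
  · have h0 : (0:Int) ≤ PySem.Int.mod shift 26 := PySem.Int.mod_nonneg _ (by norm_num)
    have hlt : PySem.Int.mod shift 26 < 26 := PySem.Int.mod_lt _ (by norm_num)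
    have hme : PySem.Int.mod shift 26 = shift % 26 := PySem.Int.mod_eq_emod_of_pos (by norm_num)
    set i : Nat := (PySem.List.index? pvKb ch).getD 0 with hi
    set n : Nat := (PySem.Int.mod shift 26).toNat with hn
    have hkb26 : (pvKb.length : Int) = 26 := by decide
    have hmod : PySem.Int.mod ((i : Int) + shift) (pvKb.length : Int)
        = (((i + n) % 26 : Nat) : Int) := by
      rw [hkb26]
      rw [PySem.Int.mod_eq_emod_of_pos (by norm_num : (0:Int) < 26)]
      have hcn : (n : Int) = shift % 26 := by omega
      push_cast
      omega
    unfold pvStepA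
    rw [if_pos hc, ← hi, hmod, PySem.List.pyGetD_natCast]
    exact pv_core n ch hc
  · unfold pvStepA
    rw [if_neg hc]
    have hfix : pvF ch = ch :=
      PySem.Dict.getD_of_not_contains pvNext ch (pv_next_keys ch hc)
    exact (Function.iterate_fixed hfix _).symm

-- ===== VERDICT =====
theorem keyboard_shift_spec : Claim_equal_keyboard_shift := by
  intro text shift _
  show keyboard_shift text shift = keyboard_shift_alt text shift
  simp only [keyboard_shift, keyboard_shift_alt]
  rw [show "qwertyuiopasdfghjklzxcvbnm".toList = pvKb from rfl]
  rw [pv_foldl_ite_append (fun ch => ch ∈ pvKb)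
        (fun ch => PySem.List.pyGetD pvKb
          (PySem.Int.mod (((PySem.List.index? pvKb ch).getD 0 : Nat) + shift) (pvKb.length : Int)) ch)
        (fun ch => ch)]
  rw [List.nil_append]
  rw [show (List.foldl (fun d p => PySem.Dict.insert d p.1 p.2) PySem.Dict.empty
        (pvKb.zip (PySem.List.slice pvKb (some 1) none ++ [PySem.List.pyGetD pvKb 0 'q'])))
      = pvNext from rfl]
  have hc : (PySem.List.pyRange 0 (PySem.Int.mod shift 26) 1).foldl
      (fun cs _ => cs.map (fun c => PySem.Dict.getD pvNext c c)) (PySem.Chars.lower text.toList)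
      = (fun cs : List Char => cs.map (fun c => PySem.Dict.getD pvNext c c))^[(PySem.List.pyRange 0 (PySem.Int.mod shift 26) 1).length] (PySem.Chars.lower text.toList) :=
    pv_foldl_const _ _ _
  rw [hc, PySem.List.length_pyRange_one, pv_iterate_map]
  refine congrArg _ (congrArg _ (congrArg _ (congrArg _ ?_)))
  apply List.map_congr_left
  intro ch _
  have h := pv_step shift ch
  unfold pvStepA at h
  simp only [Int.sub_zero, h]
  rfl
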